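-- pv_equiv track=rewrite | github.com/Shade254/Docer | main.py | get_function_until_next
-- ===== SOURCE A (Python) =====
-- def get_function_until_next(all_lines, i) -> str:
--     ret = [all_lines[i]]
--     for j in range(i + 1, i + 10000):
--         if j < len(all_lines):
--             if "def " in all_lines[j]:
--                 break
--             else:
--                 ret.append(all_lines[j])
--     return "\n".join(ret)
-- ===== SOURCE B (Python) =====
-- def get_function_until_next(all_lines, i) -> str:
--     head = all_lines[i]  # explicit index access: IndexError for out-of-range i, as in A
--     end = min(len(all_lines), i + 10000)
--     j = next((j for j in range(i + 1, end) if "def " in all_lines[j]), end)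
--     return "\n".join(all_lines[i:j])
-- ===== Notes on version B (the rewrite author's own statement) =====
-- stated objective: simpler
-- what changed: Replaces the append-accumulator loop with a break flag by a single search for the first boundary line index (next over a generator, capped at min(len, i+10000)) followed by a native slice-and-join.
-- outside the precondition, e.g. on get_function_until_next(['a', 'b'], -1): A returns 'b\na\nb', B returns 'b'
import Mathlib
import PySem

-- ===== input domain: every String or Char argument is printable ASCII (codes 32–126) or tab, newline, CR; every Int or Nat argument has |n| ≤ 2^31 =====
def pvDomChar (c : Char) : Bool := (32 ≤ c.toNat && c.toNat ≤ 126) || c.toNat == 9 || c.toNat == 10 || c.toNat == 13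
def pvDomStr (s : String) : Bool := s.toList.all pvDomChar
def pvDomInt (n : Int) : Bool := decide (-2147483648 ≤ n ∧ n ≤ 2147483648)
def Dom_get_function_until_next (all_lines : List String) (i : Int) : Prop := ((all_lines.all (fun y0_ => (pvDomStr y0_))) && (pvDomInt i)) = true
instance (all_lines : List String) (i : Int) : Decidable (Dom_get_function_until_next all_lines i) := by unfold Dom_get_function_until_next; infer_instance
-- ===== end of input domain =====

-- B replaces A's append-accumulator loop (with break) by a single search for the first
-- boundary-line index followed by a native slice-and-join; same cost, simpler decomposition.


-- ===== PORT A =====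
-- '"def " in all_lines[j]' (shared by both Pythons verbatim); the index is in range on every
-- access either port performs under Pre_, so the "" default of pyGetD is never used.
def gfunIsDef (all_lines : List String) (j : Int) : Bool :=
  PySem.Str.isIn "def " (PySem.List.pyGetD all_lines j "")

-- the loop body of A: break is modelled with the Bool flag of the state
def gfunStep (all_lines : List String) (st : List String × Bool) (j : Int) : List String × Bool :=
  if st.2 then st
  else if j < (all_lines.length : Int) then
    if gfunIsDef all_lines j then (st.1, true)
    else (st.1 ++ [PySem.List.pyGetD all_lines j ""], false)
  else st

def get_function_until_next (all_lines : List String) (i : Int) : String :=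
  match PySem.List.pyGet? all_lines i with
  | none => ""   -- IndexError in Python; excluded by Pre_
  | some head =>
    let st := (PySem.List.pyRange (i + 1) (i + 10000) 1).foldl (gfunStep all_lines) ([head], false)
    PySem.Str.join "\n" st.1

-- ===== PORT B =====
def get_function_until_next_alt (all_lines : List String) (i : Int) : String :=
  match PySem.List.pyGet? all_lines i with
  | none => ""   -- IndexError in Python; excluded by Pre_
  | some _head =>
    let e := min (all_lines.length : Int) (i + 10000)
    let j := ((PySem.List.pyRange (i + 1) e 1).find? (gfunIsDef all_lines)).getD e
    PySem.Str.join "\n" (PySem.List.slice all_lines (some i) (some j))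

-- ===== PRECONDITION & SPEC =====
-- Pre_ excludes out-of-range i, where both programs raise IndexError, and negative in-range i,
-- where A's negative-index wraparound re-reads the front of the list and appends duplicated lines.
def Pre_get_function_until_next (all_lines : List String) (i : Int) : Prop :=
  0 ≤ i ∧ i < (all_lines.length : Int)
instance (all_lines : List String) (i : Int) : Decidable (Pre_get_function_until_next all_lines i) := by
  unfold Pre_get_function_until_next; infer_instance
def pvWitness_get_function_until_next : List String × Int := (["line one", "  pass", "def g():"], 0)

def Spec_get_function_until_next (all_lines : List String) (i : Int) (out : String) : Prop := out = get_function_until_next_alt all_lines i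
instance (all_lines : List String) (i : Int) (out : String) : Decidable (Spec_get_function_until_next all_lines i out) := by unfold Spec_get_function_until_next; infer_instance

-- ===== CLAIM (what is proved, stated in full; the proofs are below) =====
def Claim_equal_get_function_until_next : Prop := ∀ (all_lines : List String) (i : Int), Dom_get_function_until_next all_lines i → Pre_get_function_until_next all_lines i → Spec_get_function_until_next all_lines i (get_function_until_next all_lines i)

-- ===== LEMMAS AND PROOFS =====

-- once the break flag is set, the rest of A's loop is a no-op
theorem gfun_foldl_broken (all_lines : List String) (L : List Int) (ret : List String) :
    L.foldl (gfunStep all_lines) (ret, true) = (ret, true) := by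
  induction L with
  | nil => rfl
  | cons j L ih => simpa [gfunStep] using ih

-- iterations with j ≥ len(all_lines) are no-ops, so the fold over the tail of the range is the identity
theorem gfun_foldl_oob (all_lines : List String) (L : List Int)
    (hL : ∀ j ∈ L, (all_lines.length : Int) ≤ j) (st : List String × Bool) :
    L.foldl (gfunStep all_lines) st = st := by
  induction L generalizing st with
  | nil => rfl
  | cons j L ih =>
    have h1 : ¬ ((j : Int) < (all_lines.length : Int)) := not_lt.2 (hL j (by simp))
    have : gfunStep all_lines st j = st := by
      unfold gfunStep; split_ifs <;> simp_all
    rw [List.foldl_cons, this]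
    exact ih (fun k hk => hL k (by simp [hk])) st

-- slice a j = all_lines[a] :: slice (a+1) j  for 0 ≤ a < len, a < j
theorem slice_cons_head (all_lines : List String) (a j : Int)
    (h0 : 0 ≤ a) (hlen : a < (all_lines.length : Int)) (hj : a < j) :
    PySem.List.slice all_lines (some a) (some j)
      = PySem.List.pyGetD all_lines a "" :: PySem.List.slice all_lines (some (a + 1)) (some j) := by
  have h0j : 0 ≤ j := le_of_lt (lt_of_le_of_lt h0 hj)
  have ha : a.toNat < all_lines.length := by omega
  rw [PySem.List.slice_toNat _ h0 h0j, PySem.List.slice_toNat _ (by omega) h0j]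
  rw [List.drop_eq_getElem_cons ha]
  have h1 : (a + 1).toNat = a.toNat + 1 := by omega
  have h2 : j.toNat - a.toNat = (j.toNat - (a.toNat + 1)) + 1 := by omega
  have hgd : PySem.List.pyGetD all_lines a "" = all_lines[a.toNat] := by
    rw [PySem.List.pyGetD_of_nonneg all_lines "" h0, List.getD_eq_getElem?_getD,
        List.getElem?_eq_getElem ha, Option.getD_some]
  rw [h1, h2, List.take_succ_cons, hgd]

-- characterisation of A's loop over an in-bounds range, against B's find?-then-slice
theorem gfun_loop_char (all_lines : List String) (b : Int) (hb : b ≤ (all_lines.length : Int)) :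
    ∀ (k : Nat) (a : Int), 0 ≤ a → a + k = b → ∀ (acc : List String),
    (PySem.List.pyRange a b 1).foldl (gfunStep all_lines) (acc, false)
      = (acc ++ PySem.List.slice all_lines (some a)
            (some (((PySem.List.pyRange a b 1).find? (gfunIsDef all_lines)).getD b)),
         ((PySem.List.pyRange a b 1).find? (gfunIsDef all_lines)).isSome) := by
  intro k
  induction k with
  | zero =>
    intro a h0 hab acc
    have hab' : a = b := by omega
    subst hab'
    simp [PySem.List.slice_toNat _ h0 h0]
  | succ k ih =>
    intro a h0 hab acc
    have hab' : a < b := by omega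
    rw [PySem.List.pyRange_one_cons hab']
    have hlen : a < (all_lines.length : Int) := lt_of_lt_of_le hab' hb
    by_cases hp : gfunIsDef all_lines a
    · have hstep : gfunStep all_lines (acc, false) a = (acc, true) := by
        simp [gfunStep, hlen, hp]
      rw [List.foldl_cons, hstep, gfun_foldl_broken]
      simp only [List.find?_cons_of_pos hp, Option.getD_some, Option.isSome_some]
      rw [PySem.List.slice_toNat _ h0 h0]
      simp
    · have hstep : gfunStep all_lines (acc, false) a
          = (acc ++ [PySem.List.pyGetD all_lines a ""], false) := by
        simp [gfunStep, hlen, hp]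
      rw [List.foldl_cons, hstep, ih (a + 1) (by omega) (by omega)]
      rw [List.find?_cons_of_neg (by simp [hp])]
      have hj : a < ((PySem.List.pyRange (a + 1) b 1).find? (gfunIsDef all_lines)).getD b := by
        cases hfind : (PySem.List.pyRange (a + 1) b 1).find? (gfunIsDef all_lines) with
        | none => simpa using hab'
        | some j =>
          have := List.find?_some hfind
          have hmem := List.mem_of_find?_eq_some hfind
          rw [PySem.List.mem_pyRange_one] at hmem
          simp only [Option.getD_some]; omega
      rw [slice_cons_head all_lines a _ h0 hlen hj]
      simp

-- ===== VERDICT (by name: the statement is the Claim_ definition above) =====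
theorem get_function_until_next_spec : Claim_equal_get_function_until_next := by
  intro all_lines i _hDom hPre
  obtain ⟨h0, hlen⟩ := hPre
  unfold Spec_get_function_until_next get_function_until_next get_function_until_next_alt
  have hget : PySem.List.pyGet? all_lines i = some all_lines[i.toNat] :=
    PySem.List.pyGet?_eq_some_getElem all_lines h0 hlen
  rw [hget]
  simp only
  set n : Int := (all_lines.length : Int) with hn
  set e : Int := min n (i + 10000) with he
  have he1 : i + 1 ≤ e := by omega
  have he2 : e ≤ n := by omega
  -- split A's range at e: the tail is out of bounds, a no-op
  have hsplit : PySem.List.pyRange (i + 1) (i + 10000) 1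
      = PySem.List.pyRange (i + 1) e 1 ++ PySem.List.pyRange e (i + 10000) 1 := by
    rw [PySem.List.pyRange_one_append _ _ _ he1 (by omega)]
  rw [hsplit, List.foldl_append]
  rw [gfun_loop_char all_lines e he2 (e - (i + 1)).toNat (i + 1) (by omega) (by omega)]
  rw [gfun_foldl_oob all_lines _ (fun j hj => by
    rw [PySem.List.mem_pyRange_one] at hj; omega)]
  simp only
  congr 1
  -- [head] ++ slice (i+1) j = slice i j
  set j : Int := ((PySem.List.pyRange (i + 1) e 1).find? (gfunIsDef all_lines)).getD e with hj
  have hij : i < j := by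
    cases hfind : (PySem.List.pyRange (i + 1) e 1).find? (gfunIsDef all_lines) with
    | none => simp [hj, hfind]; omega
    | some j' =>
      have hmem := List.mem_of_find?_eq_some hfind
      rw [PySem.List.mem_pyRange_one] at hmem
      simp [hj, hfind]; omega
  rw [slice_cons_head all_lines i j h0 hlen hij]
  rw [PySem.List.pyGetD_of_nonneg all_lines "" h0, List.getD_eq_getElem?_getD,
      List.getElem?_eq_getElem (by omega : i.toNat < all_lines.length), Option.getD_some]
  rfl
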